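-- pv_equiv track=rewrite | github.com/james5635/GeekForGeek-Data-Structure-and-Algorithm | hashing/hard/sum_unique_subarray_sums/solution.py | sum_unique_subarray_sums
-- ===== SOURCE A (Python) =====
-- from typing import List, Set
--
-- def sum_unique_subarray_sums(arr: List[int]) -> int:
--     """
--     Calculate sum of all unique subarray sums.
--
--     Args:
--         arr: Input array
--
--     Returns:
--         Sum of all unique subarray sums
--     """
--     n = len(arr)
--     unique_sums = set()
--
--     for i in range(n):
--         current_sum = 0
--         for j in range(i, n):
--             current_sum += arr[j]
--             unique_sums.add(current_sum)
--
--     return sum(unique_sums)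
-- ===== SOURCE B (Python) =====
-- def sum_unique_subarray_sums(arr):
--     """Sum of all distinct subarray sums via a one-pass DP.
--
--     `ending` is the set of sums of subarrays ending at the current index;
--     appending x turns it into {s + x for s in ending} | {x}.  Every subarray
--     ends somewhere, so unioning these sets over the pass collects exactly
--     the distinct subarray sums.
--     """
--     all_sums = set()
--     ending = set()
--     for x in arr:
--         ending = {s + x for s in ending}
--         ending.add(x)
--         all_sums |= ending
--     return sum(all_sums)
-- ===== Notes on version B (the rewrite author's own statement) =====
-- stated objective: alternative
-- what changed: B replaces A's restarted nested loops over start indices with a single left-to-right dynamic-programming pass that maintains the set of sums of subarrays ending at the current position, rebuilding it by a set-comprehension shift at each element.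
import Mathlib
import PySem

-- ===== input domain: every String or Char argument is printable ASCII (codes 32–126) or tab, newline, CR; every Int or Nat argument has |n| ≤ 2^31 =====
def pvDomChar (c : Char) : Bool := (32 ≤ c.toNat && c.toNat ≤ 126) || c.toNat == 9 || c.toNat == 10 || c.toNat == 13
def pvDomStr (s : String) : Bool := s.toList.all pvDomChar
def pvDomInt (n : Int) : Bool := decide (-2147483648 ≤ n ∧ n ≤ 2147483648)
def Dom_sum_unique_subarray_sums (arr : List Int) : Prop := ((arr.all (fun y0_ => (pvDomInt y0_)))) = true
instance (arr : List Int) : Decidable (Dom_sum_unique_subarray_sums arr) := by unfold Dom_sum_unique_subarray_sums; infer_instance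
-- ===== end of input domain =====

-- B replaces A's nested start-index loops by a one-pass DP over the set of sums of
-- subarrays ending at the current position: an alternative algorithm of the same worst-case cost.


-- ===== PORT A =====
def sum_unique_subarray_sums (arr : List Int) : Int :=
  let n : Int := arr.length
  let unique_sums : PySem.Set Int :=
    (PySem.List.pyRange 0 n 1).foldl (fun s i =>
      ((PySem.List.pyRange i n 1).foldl
        (fun (p : Int × PySem.Set Int) j =>
          let cs := p.1 + PySem.List.pyGetD arr j 0
          (cs, PySem.Set.add p.2 cs)) ((0 : Int), s)).2) PySem.Set.empty
  unique_sums.sum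

-- ===== PORT B =====
def sum_unique_subarray_sums_alt (arr : List Int) : Int :=
  let p : PySem.Set Int × PySem.Set Int :=
    arr.foldl (fun (p : PySem.Set Int × PySem.Set Int) x =>
      let ending := PySem.Set.add (PySem.Set.ofList (p.2.map (fun s => s + x))) x
      (PySem.Set.update p.1 ending, ending)) (PySem.Set.empty, PySem.Set.empty)
  p.1.sum

-- ===== PRECONDITION & SPEC =====
def Spec_sum_unique_subarray_sums (arr : List Int) (out : Int) : Prop := out = sum_unique_subarray_sums_alt arr
instance (arr : List Int) (out : Int) : Decidable (Spec_sum_unique_subarray_sums arr out) := by unfold Spec_sum_unique_subarray_sums; infer_instance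

-- ===== CLAIM (what is proved, stated in full; the proofs are below) =====
def Claim_equal_sum_unique_subarray_sums : Prop := ∀ (arr : List Int), Dom_sum_unique_subarray_sums arr → Spec_sum_unique_subarray_sums arr (sum_unique_subarray_sums arr)

-- ===== LEMMAS AND PROOFS =====

-- proof-only: y is the sum of some nonempty contiguous subarray of arr
def pvIsSub (arr : List Int) (y : Int) : Prop :=
  ∃ a m : Nat, a + m ≤ arr.length ∧ 1 ≤ m ∧ y = ((arr.drop a).take m).sum

-- proof-only helper: pvPfx c l = the running partial sums c + l[0], c + l[0] + l[1], …
def pvPfx (c : Int) : List Int → List Int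
  | [] => []
  | x :: xs => (c + x) :: pvPfx (c + x) xs

theorem pvPfx_eq_map (l : List Int) : ∀ c : Int,
    pvPfx c l = (List.range l.length).map (fun k => c + ((l.take (k+1)).sum)) := by
  induction l with
  | nil => intro c; simp [pvPfx]
  | cons x xs ih =>
    intro c
    rw [List.length_cons, List.range_succ_eq_map, List.map_cons, List.map_map]
    simp only [pvPfx, ih (c + x)]
    refine List.cons_eq_cons.mpr ⟨by simp, ?_⟩
    have hfun : (fun k => c + x + ((xs.take (k+1)).sum))
        = ((fun k => c + (((x :: xs).take (k+1)).sum)) ∘ Nat.succ) := by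
      funext k
      simp [Function.comp, List.take_succ_cons]
      ring
    rw [hfun]

-- a foldl of Set.update is one Set.update of the concatenation
theorem pvFoldlUpdate {α : Type} [BEq α] (l : List Int) (g : Int → List α) :
    ∀ s : PySem.Set α,
    l.foldl (fun s j => PySem.Set.update s (g j)) s = PySem.Set.update s (l.flatMap g) := by
  induction l with
  | nil => intro s; simp [PySem.Set.update]
  | cons j l ih => intro s; rw [List.foldl_cons, ih, List.flatMap_cons, PySem.Set.update_append]

-- A's inner loop: the carried sum and the set of partial sums added
theorem pvInnerA (h : Int → Int) (js : List Int) : ∀ (c : Int) (s : PySem.Set Int),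
    js.foldl (fun p j => (p.1 + h j, PySem.Set.add p.2 (p.1 + h j))) (c, s)
      = (c + (js.map h).sum, PySem.Set.update s (pvPfx c (js.map h))) := by
  induction js with
  | nil => intro c s; simp [pvPfx, PySem.Set.update]
  | cons j js ih =>
    intro c s
    rw [List.foldl_cons, ih (c + h j) (PySem.Set.add s (c + h j))]
    simp [pvPfx, PySem.Set.update_cons]
    ring

-- A's set of collected sums is exactly the subarray sums of arr
theorem pvA_mem (arr : List Int) (y : Int) :
    y ∈ (PySem.List.pyRange 0 (arr.length : Int) 1).foldl (fun s i =>
        ((PySem.List.pyRange i (arr.length : Int) 1).foldl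
          (fun (p : Int × PySem.Set Int) j =>
            (p.1 + PySem.List.pyGetD arr j 0, PySem.Set.add p.2 (p.1 + PySem.List.pyGetD arr j 0)))
          ((0 : Int), s)).2) PySem.Set.empty
      ↔ pvIsSub arr y := by
  have hb : (fun (s : PySem.Set Int) (i : Int) =>
      ((PySem.List.pyRange i (arr.length : Int) 1).foldl
        (fun (p : Int × PySem.Set Int) j =>
          (p.1 + PySem.List.pyGetD arr j 0, PySem.Set.add p.2 (p.1 + PySem.List.pyGetD arr j 0)))
        ((0 : Int), s)).2)
      = fun s i => PySem.Set.update s (pvPfx 0 ((PySem.List.pyRange i (arr.length : Int) 1).map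
          (fun j => PySem.List.pyGetD arr j 0))) := by
    funext s i
    rw [pvInnerA]
  rw [hb, pvFoldlUpdate]
  show y ∈ PySem.Set.update PySem.Set.empty _ ↔ _
  rw [PySem.Set.mem_update]
  simp only [PySem.Set.empty, List.not_mem_nil, false_or]
  rw [List.mem_flatMap]
  constructor
  · rintro ⟨i, hi, hyi⟩
    rw [PySem.List.mem_pyRange_one] at hi
    rw [PySem.List.map_pyGetD_pyRange' arr 0 hi.1, pvPfx_eq_map] at hyi
    obtain ⟨k, hk, rfl⟩ := List.mem_map.mp hyi
    rw [List.mem_range, List.length_drop] at hk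
    refine ⟨i.toNat, k + 1, by omega, by omega, by simp⟩
  · rintro ⟨a, m, hle, hm, rfl⟩
    refine ⟨((a : Nat) : Int), ?_, ?_⟩
    · rw [PySem.List.mem_pyRange_one]; constructor <;> omega
    · rw [PySem.List.map_pyGetD_pyRange' arr 0 (by omega), pvPfx_eq_map]
      refine List.mem_map.mpr ⟨m - 1, ?_, ?_⟩
      · rw [List.mem_range, List.length_drop, Int.toNat_natCast]; omega
      · rw [Int.toNat_natCast, show m - 1 + 1 = m by omega]; simp

-- B's invariant: after the pass, .2 holds the sums of nonempty suffixes of arr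
-- and .1 holds all subarray sums; both Nodup.
theorem pvB_inv (arr : List Int) :
    (arr.foldl (fun (p : PySem.Set Int × PySem.Set Int) x =>
        (PySem.Set.update p.1 (PySem.Set.add (PySem.Set.ofList (p.2.map (fun s => s + x))) x),
         PySem.Set.add (PySem.Set.ofList (p.2.map (fun s => s + x))) x))
      (PySem.Set.empty, PySem.Set.empty)).2.Nodup ∧
    (arr.foldl (fun (p : PySem.Set Int × PySem.Set Int) x =>
        (PySem.Set.update p.1 (PySem.Set.add (PySem.Set.ofList (p.2.map (fun s => s + x))) x),
         PySem.Set.add (PySem.Set.ofList (p.2.map (fun s => s + x))) x))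
      (PySem.Set.empty, PySem.Set.empty)).1.Nodup ∧
    (∀ y, y ∈ (arr.foldl (fun (p : PySem.Set Int × PySem.Set Int) x =>
        (PySem.Set.update p.1 (PySem.Set.add (PySem.Set.ofList (p.2.map (fun s => s + x))) x),
         PySem.Set.add (PySem.Set.ofList (p.2.map (fun s => s + x))) x))
      (PySem.Set.empty, PySem.Set.empty)).2
        ↔ ∃ a : Nat, a < arr.length ∧ y = (arr.drop a).sum) ∧
    (∀ y, y ∈ (arr.foldl (fun (p : PySem.Set Int × PySem.Set Int) x =>
        (PySem.Set.update p.1 (PySem.Set.add (PySem.Set.ofList (p.2.map (fun s => s + x))) x),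
         PySem.Set.add (PySem.Set.ofList (p.2.map (fun s => s + x))) x))
      (PySem.Set.empty, PySem.Set.empty)).1
        ↔ pvIsSub arr y) := by
  induction arr using List.reverseRecOn with
  | nil =>
    refine ⟨List.nodup_nil, List.nodup_nil, ?_, ?_⟩
    · intro y; simp [PySem.Set.empty]
    · intro y
      simp only [PySem.Set.empty, List.foldl_nil, List.not_mem_nil, false_iff, pvIsSub]
      rintro ⟨a, m, hle, hm, _⟩
      simp at hle; omega
  | append_singleton l x ih =>
    obtain ⟨hnd2, hnd1, hmem2, hmem1⟩ := ih
    rw [List.foldl_append]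
    simp only [List.foldl_cons, List.foldl_nil]
    set st := l.foldl (fun (p : PySem.Set Int × PySem.Set Int) x =>
        (PySem.Set.update p.1 (PySem.Set.add (PySem.Set.ofList (p.2.map (fun s => s + x))) x),
         PySem.Set.add (PySem.Set.ofList (p.2.map (fun s => s + x))) x))
      (PySem.Set.empty, PySem.Set.empty) with hst
    have hend : ∀ y, y ∈ PySem.Set.add (PySem.Set.ofList (st.2.map (fun s => s + x))) x
        ↔ ∃ a : Nat, a < (l ++ [x]).length ∧ y = ((l ++ [x]).drop a).sum := by
      simp only [List.length_append, List.length_singleton]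
      intro y
      rw [PySem.Set.mem_add, PySem.Set.mem_ofList, List.mem_map]
      have hdrop : ∀ a : Nat, a ≤ l.length → ((l ++ [x]).drop a) = l.drop a ++ [x] := by
        intro a ha
        rw [List.drop_append_of_le_length ha]
      constructor
      · rintro (⟨s, hs, rfl⟩ | rfl)
        · obtain ⟨a, ha, rfl⟩ := (hmem2 s).mp hs
          exact ⟨a, by omega, by rw [hdrop a (by omega)]; simp⟩
        · exact ⟨l.length, by omega, by rw [hdrop l.length le_rfl]; simp⟩
      · rintro ⟨a, ha, rfl⟩
        by_cases hcase : a < l.length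
        · exact Or.inl ⟨(l.drop a).sum, (hmem2 _).mpr ⟨a, hcase, rfl⟩,
            by rw [hdrop a (by omega)]; simp⟩
        · have : a = l.length := by omega
          subst this
          exact Or.inr (by rw [hdrop l.length le_rfl]; simp)
    refine ⟨PySem.Set.nodup_add _ _ (PySem.Set.nodup_ofList _), PySem.Set.nodup_update _ _ hnd1, hend, ?_⟩
    intro y
    have hlen : (l ++ [x]).length = l.length + 1 := by simp
    rw [PySem.Set.mem_update, hmem1, hend]
    constructor
    · rintro (⟨a, m, hle, hm, rfl⟩ | ⟨a, ha, rfl⟩)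
      · refine ⟨a, m, by simp; omega, hm, ?_⟩
        rw [List.drop_append_of_le_length (by omega),
          List.take_append_of_le_length (by rw [List.length_drop]; omega)]
      · refine ⟨a, l.length + 1 - a, by simp; omega, by omega, ?_⟩
        rw [List.drop_append_of_le_length (by omega)]
        rw [List.take_of_length_le (by simp [List.length_drop]; omega)]
    · rintro ⟨a, m, hle, hm, rfl⟩
      rw [List.length_append, List.length_singleton] at hle
      by_cases hcase : a + m ≤ l.length
      · refine Or.inl ⟨a, m, hcase, hm, ?_⟩
        rw [List.drop_append_of_le_length (by omega),
          List.take_append_of_le_length (by rw [List.length_drop]; omega)]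
      · have hm' : a + m = l.length + 1 := by omega
        refine Or.inr ⟨a, by omega, ?_⟩
        rw [List.drop_append_of_le_length (by omega)]
        rw [List.take_of_length_le (by simp [List.length_drop]; omega)]

theorem sum_unique_subarray_sums_agree (arr : List Int) :
    sum_unique_subarray_sums arr = sum_unique_subarray_sums_alt arr := by
  unfold sum_unique_subarray_sums sum_unique_subarray_sums_alt
  obtain ⟨_, hnd1, _, hmem1⟩ := pvB_inv arr
  apply List.Perm.sum_eq
  rw [List.perm_ext_iff_of_nodup ?_ hnd1]
  · intro y
    rw [hmem1 y]
    exact pvA_mem arr y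
  · -- A's set is built by Set.update from empty, hence Nodup
    have hb : (fun (s : PySem.Set Int) (i : Int) =>
        ((PySem.List.pyRange i (arr.length : Int) 1).foldl
          (fun (p : Int × PySem.Set Int) j =>
            let cs := p.1 + PySem.List.pyGetD arr j 0
            (cs, PySem.Set.add p.2 cs)) ((0 : Int), s)).2)
        = fun s i => PySem.Set.update s (pvPfx 0 ((PySem.List.pyRange i (arr.length : Int) 1).map
            (fun j => PySem.List.pyGetD arr j 0))) := by
      funext s i
      rw [show (fun (p : Int × PySem.Set Int) j =>
            let cs := p.1 + PySem.List.pyGetD arr j 0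
            (cs, PySem.Set.add p.2 cs))
          = (fun (p : Int × PySem.Set Int) j =>
            (p.1 + PySem.List.pyGetD arr j 0, PySem.Set.add p.2 (p.1 + PySem.List.pyGetD arr j 0)))
          from rfl, pvInnerA]
    rw [hb, pvFoldlUpdate]
    exact PySem.Set.nodup_update _ _ List.nodup_nil

-- ===== VERDICT (by name: the statement is the Claim_ definition above) =====
theorem sum_unique_subarray_sums_spec : Claim_equal_sum_unique_subarray_sums := by
  intro arr _
  exact sum_unique_subarray_sums_agree arr
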